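-- pv_equiv track=rewrite | github.com/wakandan/learning | lbp/test_lbp.py | is_uniform
-- ===== SOURCE A (Python) =====
-- def is_uniform(pattern):
--     num_change = 0
--     for i in range(len(pattern) - 1):
--         if pattern[i + 1] != pattern[i]:
--             num_change += 1
--     if pattern[0] != pattern[-1]:
--         num_change += 1
--     return num_change <= 2
-- ===== SOURCE B (Python) =====
-- def is_uniform(pattern):
--     # Shape test: a pattern is uniform (<=2 circular transitions) exactly when it
--     # consists of a run of its first value, then one other run, then first-value again.
--     x = pattern[0]
--     i = 0
--     while i < len(pattern) and pattern[i] == x: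
--         i += 1
--     if i == len(pattern):
--         return True
--     y = pattern[i]
--     while i < len(pattern) and pattern[i] == y:
--         i += 1
--     return all(v == x for v in pattern[i:])
-- ===== Notes on version B (the rewrite author's own statement) =====
-- stated objective: alternative
-- what changed: B never counts transitions: it tests the circular shape directly, skipping the leading run of the first value, then one second run, and checking that everything after it equals the first value again (x^a y^b x^c), which characterises <=2 circular transitions.
import Mathlib
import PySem

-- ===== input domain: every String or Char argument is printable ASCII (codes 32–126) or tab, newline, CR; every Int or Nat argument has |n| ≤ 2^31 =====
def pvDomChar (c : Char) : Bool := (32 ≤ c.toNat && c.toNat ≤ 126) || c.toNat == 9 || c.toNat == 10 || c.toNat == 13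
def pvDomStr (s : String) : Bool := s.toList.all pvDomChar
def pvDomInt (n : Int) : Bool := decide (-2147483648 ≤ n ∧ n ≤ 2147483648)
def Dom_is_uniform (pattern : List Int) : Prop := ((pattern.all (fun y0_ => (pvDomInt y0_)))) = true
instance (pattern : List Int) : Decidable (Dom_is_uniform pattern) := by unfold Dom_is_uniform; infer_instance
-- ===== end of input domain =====

-- B replaces A's transition counting by a direct shape test (skip the leading run of the first
-- value, skip one further run, check the rest equals the first value again); alternative algorithm,
-- same O(n) cost.

-- ===== PORT A =====
def is_uniform (pattern : List Int) : Bool :=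
  let num_change : Int :=
    (PySem.List.pyRange 0 ((pattern.length : Int) - 1) 1).foldl
      (fun acc i =>
        if PySem.List.pyGetD pattern (i + 1) 0 ≠ PySem.List.pyGetD pattern i 0 then acc + 1
        else acc) 0
  let num_change :=
    if PySem.List.pyGetD pattern 0 0 ≠ PySem.List.pyGetD pattern (-1) 0 then num_change + 1
    else num_change
  decide (num_change ≤ 2)

-- ===== PORT B =====
-- B's while loops: advance i while i < len(pattern) and pattern[i] == v (exact: the guard keeps
-- the index in range, so getD is Python's pattern[i]).
def pvSkipRun (p : List Int) (v : Int) (i : Nat) : Nat :=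
  if _h : i < p.length ∧ p.getD i 0 = v then pvSkipRun p v (i + 1) else i
termination_by p.length - i
decreasing_by omega

def is_uniform_alt (pattern : List Int) : Bool :=
  let x := PySem.List.pyGetD pattern 0 0
  let i := pvSkipRun pattern x 0
  if i = pattern.length then true
  else
    let y := pattern.getD i 0
    let j := pvSkipRun pattern y i
    (PySem.List.slice pattern (some (j : Int)) none).all (fun v => v == x)

-- ===== PRECONDITION & SPEC =====
-- Pre_ excludes only the empty list, on which the Python A (and B) raises IndexError at the first-element access.
def Pre_is_uniform (pattern : List Int) : Prop := pattern ≠ []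
instance (pattern : List Int) : Decidable (Pre_is_uniform pattern) := by
  unfold Pre_is_uniform; infer_instance

def pvWitness_is_uniform : List Int := [0, 1, 1, 0]

def Spec_is_uniform (pattern : List Int) (out : Bool) : Prop := out = is_uniform_alt pattern
instance (pattern : List Int) (out : Bool) : Decidable (Spec_is_uniform pattern out) := by
  unfold Spec_is_uniform; infer_instance

-- ===== CLAIM (what is proved, stated in full; the proofs are below) =====
def Claim_equal_is_uniform : Prop :=
  ∀ (pattern : List Int), Dom_is_uniform pattern → Pre_is_uniform pattern →
    Spec_is_uniform pattern (is_uniform pattern)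

-- ===== LEMMAS AND PROOFS =====

-- number of adjacent changes in a list (a clean recursive form of A's counter)
def pvT : List Int → Nat
  | [] => 0
  | [_] => 0
  | a :: b :: t => (if b ≠ a then 1 else 0) + pvT (b :: t)

-- A's loop equals a countP over the index range
theorem pv_A_count (l : List Int) (x : Int) (xs : List Int) (h : l = x :: xs) :
    (PySem.List.pyRange 0 ((l.length : Int) - 1) 1).foldl
      (fun acc i =>
        if PySem.List.pyGetD l (i + 1) 0 ≠ PySem.List.pyGetD l i 0 then acc + 1 else acc) 0
    = ((List.range xs.length).countP
        (fun k => !(l.getD (k + 1) 0 == l.getD k 0)) : Int) := by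
  have hb : ((l.length : Int) - 1) = (xs.length : Nat) := by subst h; simp
  rw [hb, PySem.List.pyRange_one, List.foldl_map]
  have hf : (fun (acc : Int) (k : Nat) =>
      if PySem.List.pyGetD l ((0 : Int) + k + 1) 0 ≠ PySem.List.pyGetD l ((0 : Int) + k) 0
      then acc + 1 else acc)
      = (fun acc k =>
        if (!(l.getD (k + 1) 0 == l.getD k 0)) = true then acc + 1 else acc) := by
    funext acc k
    have h1 : ((0 : Int) + k + 1) = ((k + 1 : Nat) : Int) := by push_cast; ring
    have h2 : ((0 : Int) + k) = ((k : Nat) : Int) := by simp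
    rw [h1, h2, PySem.List.pyGetD_natCast, PySem.List.pyGetD_natCast]
    by_cases hc : l.getD (k + 1) 0 = l.getD k 0
    · rw [if_neg (not_not_intro hc), if_neg (by simpa using hc)]
    · rw [if_pos hc, if_pos (by simpa using hc)]
  rw [hf, PySem.List.foldl_count_if]
  simp

-- the countP is pvT
theorem pv_countP_T (xs : List Int) (x : Int) :
    (List.range xs.length).countP
      (fun k => !((x :: xs).getD (k + 1) 0 == (x :: xs).getD k 0)) = pvT (x :: xs) := by
  induction xs generalizing x with
  | nil => simp [pvT]
  | cons a t ih =>
      rw [List.length_cons, List.range_succ_eq_map, List.countP_cons, List.countP_map]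
      have hshift : List.countP
          ((fun k => !((x :: a :: t).getD (k + 1) 0 == (x :: a :: t).getD k 0)) ∘ Nat.succ)
          (List.range t.length)
          = List.countP (fun k => !((a :: t).getD (k + 1) 0 == (a :: t).getD k 0))
            (List.range t.length) := by
        apply List.countP_congr
        intro k _
        simp [Function.comp, Nat.succ_eq_add_one]
      rw [hshift, ih a]
      simp only [pvT]
      by_cases hax : a = x <;> simp [hax, Nat.add_comm]

-- last element of a nonempty list (0 for [])
def pvLast : List Int → Int
  | [] => 0
  | [a] => a
  | _ :: b :: t => pvLast (b :: t)

theorem pv_getLast_eq (l : List Int) (h : l ≠ []) : l.getLast h = pvLast l := by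
  induction l with
  | nil => exact absurd rfl h
  | cons a t ih =>
      cases t with
      | nil => simp [pvLast]
      | cons b t' =>
          rw [List.getLast_cons_cons, ih (by simp)]
          simp [pvLast]

-- pvT through the leading run of x
theorem pv_T_dropWhile (xs : List Int) (x : Int) :
    pvT (x :: xs) =
      (if xs.dropWhile (· == x) = [] then 0
       else 1 + pvT (xs.dropWhile (· == x))) := by
  induction xs generalizing x with
  | nil => simp [pvT]
  | cons a t ih =>
      by_cases hax : a = x
      · subst hax
        have hdw : List.dropWhile (· == a) (a :: t) = List.dropWhile (· == a) t := by
          simp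
        simp only [pvT]
        rw [hdw, ih a]
        simp
      · have hbeq : (a == x) = false := by simpa using hax
        simp [pvT, hbeq, hax]

-- pvLast through the leading run of x
theorem pv_last_dropWhile (xs : List Int) (x : Int) :
    pvLast (x :: xs) =
      (if xs.dropWhile (· == x) = [] then x
       else pvLast (xs.dropWhile (· == x))) := by
  induction xs generalizing x with
  | nil => simp [pvLast]
  | cons a t ih =>
      by_cases hax : a = x
      · subst hax
        have hdw : List.dropWhile (· == a) (a :: t) = List.dropWhile (· == a) t := by
          simp
        rw [hdw, show pvLast (a :: a :: t) = pvLast (a :: t) from rfl, ih a]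
      · have hbeq : (a == x) = false := by simpa using hax
        simp [hbeq, pvLast]

-- pvT = 0 means constant
theorem pv_T_zero (t : List Int) (z : Int) :
    pvT (z :: t) = 0 ↔ t.all (· == z) = true := by
  induction t generalizing z with
  | nil => simp [pvT]
  | cons a t' ih =>
      simp only [pvT, List.all_cons, Bool.and_eq_true, beq_iff_eq]
      constructor
      · intro h
        have haz : a = z := by by_contra hne; simp [hne] at h
        subst haz
        simp at h
        exact ⟨rfl, (ih a).mp h⟩
      · rintro ⟨haz, hall⟩
        subst haz
        simp [(ih a).mpr hall]

-- constant list: last element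
theorem pv_last_const (t : List Int) (z : Int) (h : t.all (· == z) = true) :
    pvLast (z :: t) = z := by
  induction t generalizing z with
  | nil => simp [pvLast]
  | cons a t' ih =>
      simp only [List.all_cons, Bool.and_eq_true, beq_iff_eq] at h
      obtain ⟨haz, hall⟩ := h
      subst haz
      rw [show pvLast (a :: a :: t') = pvLast (a :: t') from rfl]
      exact ih a hall

-- "all equal x" vs "constant with last x", for nonempty lists
theorem pv_all_iff (z : Int) (t : List Int) (x : Int) :
    (z :: t).all (· == x) = true ↔ (pvT (z :: t) = 0 ∧ pvLast (z :: t) = x) := by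
  constructor
  · intro h
    simp only [List.all_cons, Bool.and_eq_true, beq_iff_eq] at h
    obtain ⟨hzx, hall⟩ := h
    subst hzx
    exact ⟨(pv_T_zero t z).mpr hall, pv_last_const t z hall⟩
  · rintro ⟨hT, hlast⟩
    have hall := (pv_T_zero t z).mp hT
    have hzx : z = x := by rw [pv_last_const t z hall] at hlast; exact hlast
    subst hzx
    simp [hall]

-- the while loop skips exactly the run of v starting at i
theorem pvSkipRun_spec (p : List Int) (v : Int) (i : Nat) :
    i ≤ p.length →
      i ≤ pvSkipRun p v i ∧ pvSkipRun p v i ≤ p.length ∧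
        p.drop (pvSkipRun p v i) = (p.drop i).dropWhile (· == v) := by
  induction i using pvSkipRun.induct p v with
  | case1 i h ih =>
      intro _
      obtain ⟨hlt, hv⟩ := h
      obtain ⟨h1, h2, h3⟩ := ih hlt
      rw [pvSkipRun, dif_pos ⟨hlt, hv⟩]
      refine ⟨by omega, h2, ?_⟩
      rw [h3, List.drop_eq_getElem_cons hlt, List.dropWhile_cons]
      have hb : (p[i] == v) = true := by
        simpa [List.getD_eq_getElem?_getD, List.getElem?_eq_getElem hlt] using hv
      simp [hb]
  | case2 i h =>
      intro hi
      rw [pvSkipRun, dif_neg h]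
      refine ⟨le_refl i, hi, ?_⟩
      by_cases hlt : i < p.length
      · have hv : ¬ p.getD i 0 = v := fun hv => h ⟨hlt, hv⟩
        rw [List.drop_eq_getElem_cons hlt, List.dropWhile_cons]
        have hb : (p[i] == v) = false := by
          simpa [List.getD_eq_getElem?_getD, List.getElem?_eq_getElem hlt] using hv
        simp [hb]
      · have hnil : p.drop i = [] := List.drop_eq_nil_of_le (by omega)
        simp [hnil]

-- ===== VERDICT (by name: the statement is the Claim_ definition above) =====
theorem is_uniform_spec : Claim_equal_is_uniform := by
  intro pattern _ hpre
  unfold Spec_is_uniform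
  cases pattern with
  | nil => exact absurd rfl hpre
  | cons x xs =>
    have hne : (x :: xs) ≠ [] := by simp
    have hlastA : PySem.List.pyGetD (x :: xs) (-1) 0 = pvLast (x :: xs) := by
      rw [PySem.List.pyGetD_neg_one (x :: xs) 0 hne]
      exact pv_getLast_eq _ hne
    simp only [is_uniform, is_uniform_alt]
    rw [pv_A_count (x :: xs) x xs rfl, pv_countP_T xs x, hlastA,
      PySem.List.pyGetD_zero_cons]
    -- the two scans
    obtain ⟨hi0, hi1, hdrop1⟩ := pvSkipRun_spec (x :: xs) x 0 (Nat.zero_le _)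
    set i1 := pvSkipRun (x :: xs) x 0 with hi1def
    set d := xs.dropWhile (· == x) with hd
    have hdrop1' : (x :: xs).drop i1 = d := by
      rw [hdrop1, hd]; simp
    by_cases hdnil : d = []
    · -- constant pattern: B's first scan reaches the end
      have hi1len : i1 = (x :: xs).length := by
        have hlen := congrArg List.length hdrop1'
        rw [hdnil] at hlen
        simp only [List.length_drop, List.length_nil, List.length_cons] at hlen hi1 ⊢
        omega
      rw [if_pos hi1len]
      have hT : pvT (x :: xs) = 0 := by rw [pv_T_dropWhile, ← hd, if_pos hdnil]
      have hlast : pvLast (x :: xs) = x := by rw [pv_last_dropWhile, ← hd, if_pos hdnil]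
      rw [hT, hlast]
      simp
    · -- a second run exists
      obtain ⟨z, d', hzd⟩ := List.exists_cons_of_ne_nil hdnil
      have hi1lt : i1 < (x :: xs).length := by
        by_contra hge
        have : (x :: xs).drop i1 = [] := List.drop_eq_nil_of_le (by omega)
        rw [hdrop1'] at this
        exact hdnil this
      rw [if_neg (show ¬ i1 = (x :: xs).length by omega)]
      have hpz : (x :: xs).getD i1 0 = z := by
        have hcons : (x :: xs).drop i1 = z :: d' := by rw [hdrop1', hzd]
        have hg := List.drop_eq_getElem_cons hi1lt
        rw [hcons] at hg
        have hget : (x :: xs)[i1] = z := by injection hg.symm with h1 _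
        simp [List.getD_eq_getElem?_getD, List.getElem?_eq_getElem hi1lt, hget]
      have hzx : z ≠ x := by
        have hdd : List.dropWhile (fun a => a == x) xs = z :: d' := by
          rw [← hd]; exact hzd
        have hh := List.head_dropWhile_not (p := fun a => a == x) (l := xs)
          (w := by rw [hdd]; simp)
        simp [hdd] at hh
        exact hh
      rw [hpz]
      obtain ⟨hj0, hj1, hdrop2⟩ := pvSkipRun_spec (x :: xs) z i1 (le_of_lt hi1lt)
      set j := pvSkipRun (x :: xs) z i1 with hjdef
      set s := d.dropWhile (· == z) with hs
      have hdrop2' : (x :: xs).drop j = s := by rw [hdrop2, hdrop1', hs]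
      have hs' : s = d'.dropWhile (· == z) := by
        rw [hs, hzd, List.dropWhile_cons]
        simp
      rw [PySem.List.slice_from_natCast, hdrop2']
      -- A through the two runs
      have hT : pvT (x :: xs) = 1 + pvT d := by rw [pv_T_dropWhile, ← hd, if_neg hdnil]
      have hlast : pvLast (x :: xs) = pvLast d := by
        rw [pv_last_dropWhile, ← hd, if_neg hdnil]
      have hTd : pvT d = (if s = [] then 0 else 1 + pvT s) := by
        rw [hzd, pv_T_dropWhile, ← hs']
      have hlastd : pvLast d = (if s = [] then z else pvLast s) := by
        rw [hzd, pv_last_dropWhile, ← hs']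
      by_cases hsnil : s = []
      · rw [hsnil]
        have hT2 : pvT (x :: xs) = 1 := by rw [hT, hTd, if_pos hsnil]
        have hl2 : pvLast (x :: xs) = z := by rw [hlast, hlastd, if_pos hsnil]
        rw [hT2, hl2]
        simp [Ne.symm hzx]
      · obtain ⟨w, s', hws⟩ := List.exists_cons_of_ne_nil hsnil
        have hT2 : pvT (x :: xs) = 2 + pvT s := by rw [hT, hTd, if_neg hsnil]; ring
        have hl2 : pvLast (x :: xs) = pvLast s := by rw [hlast, hlastd, if_neg hsnil]
        rw [hT2, hl2, hws]
        by_cases hall : (w :: s').all (· == x) = true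
        · obtain ⟨hT0, hlx⟩ := (pv_all_iff w s' x).mp hall
          rw [hall, hT0, hlx]
          simp
        · rw [Bool.eq_false_iff.mpr hall]
          have hor : ¬ (pvT (w :: s') = 0 ∧ pvLast (w :: s') = x) := fun h =>
            hall ((pv_all_iff w s' x).mpr h)
          rcases Decidable.not_and_iff_not_or_not.mp hor with hT0 | hlx
          · have h1 : 1 ≤ pvT (w :: s') := Nat.one_le_iff_ne_zero.mpr hT0
            apply decide_eq_false
            intro hle
            by_cases hw2 : x ≠ pvLast (w :: s') <;> simp [hw2] at hle <;> omega
          · have hw2 : x ≠ pvLast (w :: s') := fun h => hlx h.symm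
            apply decide_eq_false
            simp [hw2]
            omega
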